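-- pv_equiv track=rewrite | github.com/lijiannan828-oss/autoflow | backend/orchestrator/db_read_side.py | _derive_run_status
-- ===== SOURCE A (Python) =====
-- from typing import Any
--
-- def _derive_run_status(rows: list[dict[str, Any]]) -> str:
--     statuses = {(row.get("status") or "").lower() for row in rows}
--     if statuses & {"failed", "rejected", "returned"}:
--         return "failed"
--     if statuses & {"pending", "active", "in_progress", "generating"}:
--         return "running"
--     if rows:
--         return "succeeded"
--     return "pending"
-- ===== SOURCE B (Python) =====
-- def _rank(status):
--     if status in ("failed", "rejected", "returned"):
--         return 2
--     if status in ("pending", "active", "in_progress", "generating"):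
--         return 1
--     return 0
--
--
-- def _derive_run_status(rows):
--     top = None
--     for row in rows:
--         r = _rank((row.get("status") or "").lower())
--         if top is None or r > top:
--             top = r
--     if top is None:
--         return "pending"
--     if top == 2:
--         return "failed"
--     if top == 1:
--         return "running"
--     return "succeeded"
-- ===== Notes on version B (the rewrite author's own statement) =====
-- stated objective: alternative
-- what changed: Replaces A's build-a-set-of-statuses plus two set-intersection tests with a single pass that maps each row's lowercased status to a priority rank (failed-like=2, running-like=1, else 0), keeps the running maximum (None for no rows), and translates the final rank back to a status.
import Mathlib
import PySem

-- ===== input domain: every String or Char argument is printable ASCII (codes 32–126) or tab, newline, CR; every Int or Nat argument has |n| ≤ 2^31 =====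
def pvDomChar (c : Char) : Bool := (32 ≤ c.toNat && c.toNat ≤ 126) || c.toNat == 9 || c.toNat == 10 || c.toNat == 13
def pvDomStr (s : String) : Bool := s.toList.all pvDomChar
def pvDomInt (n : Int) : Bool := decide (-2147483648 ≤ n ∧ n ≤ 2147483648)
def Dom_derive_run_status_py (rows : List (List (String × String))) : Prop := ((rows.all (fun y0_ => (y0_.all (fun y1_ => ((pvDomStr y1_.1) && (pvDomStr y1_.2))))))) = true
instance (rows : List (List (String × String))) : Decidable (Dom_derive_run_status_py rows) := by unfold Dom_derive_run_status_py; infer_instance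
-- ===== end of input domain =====

-- B replaces A's set-of-statuses + intersection tests by a single max-priority reduction (rank each row, keep the max); objective: alternative decomposition, same cost.

-- Python `x or ""` on an Optional[str] (both sources use the identical expression)
def pyOrStr (o : Option String) : String :=
  match o with
  | none => ""
  | some s => if s = "" then "" else s

-- (row.get("status") or "").lower() — the identical expression in both sources
def lowStatus (row : List (String × String)) : String :=
  PySem.Str.lower (pyOrStr ((PySem.Dict.mk row).get? "status"))

-- ===== PORT A =====
def derive_run_status_py (rows : List (List (String × String))) : String :=
  let statuses : PySem.Set String := PySem.Set.ofList (rows.map (fun row => lowStatus row))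
  if PySem.Set.inter statuses ["failed", "rejected", "returned"] ≠ [] then "failed"
  else if PySem.Set.inter statuses ["pending", "active", "in_progress", "generating"] ≠ [] then "running"
  else if rows ≠ [] then "succeeded"
  else "pending"

-- ===== PORT B =====
def rankB (status : String) : Int :=
  if status = "failed" ∨ status = "rejected" ∨ status = "returned" then 2
  else if status = "pending" ∨ status = "active" ∨ status = "in_progress" ∨ status = "generating" then 1
  else 0

-- the loop body of B's for-loop
def stepB (top : Option Int) (row : List (String × String)) : Option Int :=
  let r := rankB (lowStatus row)
  match top with
  | none => some r
  | some t => if r > t then some r else some t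

def derive_run_status_py_alt (rows : List (List (String × String))) : String :=
  let top : Option Int := rows.foldl stepB none
  match top with
  | none => "pending"
  | some t => if t = 2 then "failed" else if t = 1 then "running" else "succeeded"

-- ===== PRECONDITION & SPEC =====
def Spec_derive_run_status_py (rows : List (List (String × String))) (out : String) : Prop := out = derive_run_status_py_alt rows
instance (rows : List (List (String × String))) (out : String) : Decidable (Spec_derive_run_status_py rows out) := by unfold Spec_derive_run_status_py; infer_instance

-- ===== CLAIM =====
def Claim_equal_derive_run_status_py : Prop := ∀ (rows : List (List (String × String))), Dom_derive_run_status_py rows → Spec_derive_run_status_py rows (derive_run_status_py rows)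

-- ===== LEMMAS AND PROOFS =====

theorem rankB_le (s : String) : rankB s ≤ 2 := by
  unfold rankB; split_ifs <;> omega

theorem rank_two_iff (s : String) :
    (2 : Int) ≤ rankB s ↔ s ∈ (["failed", "rejected", "returned"] : List String) := by
  unfold rankB; split_ifs with h1 h2 <;> simp_all

theorem rank_one_iff (s : String) :
    (1 : Int) ≤ rankB s ↔ (s ∈ (["failed", "rejected", "returned"] : List String) ∨
      s ∈ (["pending", "active", "in_progress", "generating"] : List String)) := by
  unfold rankB; split_ifs with h1 h2 <;> simp_all

-- the canonical cascade both programs compute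
def cascade (rows : List (List (String × String))) : String :=
  if ∃ row ∈ rows, (2 : Int) ≤ rankB (lowStatus row) then "failed"
  else if ∃ row ∈ rows, (1 : Int) ≤ rankB (lowStatus row) then "running"
  else if rows ≠ [] then "succeeded"
  else "pending"

theorem inter_ne_nil_iff (rows : List (List (String × String))) (t : List String) :
    PySem.Set.inter (PySem.Set.ofList (rows.map (fun row => lowStatus row))) t ≠ [] ↔
      ∃ row ∈ rows, lowStatus row ∈ t := by
  rw [Ne, List.eq_nil_iff_forall_not_mem]
  push Not
  constructor
  · rintro ⟨x, hx⟩
    rw [PySem.Set.mem_inter, PySem.Set.mem_ofList, List.mem_map] at hx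
    obtain ⟨⟨row, hr, rfl⟩, hxt⟩ := hx
    exact ⟨row, hr, hxt⟩
  · rintro ⟨row, hr, hm⟩
    exact ⟨lowStatus row, by
      rw [PySem.Set.mem_inter, PySem.Set.mem_ofList, List.mem_map]
      exact ⟨⟨row, hr, rfl⟩, hm⟩⟩

theorem A_eq_cascade (rows : List (List (String × String))) :
    derive_run_status_py rows = cascade rows := by
  unfold derive_run_status_py cascade
  simp only [inter_ne_nil_iff]
  by_cases h2 : ∃ row ∈ rows, (2 : Int) ≤ rankB (lowStatus row)
  · rw [if_pos h2, if_pos (by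
      obtain ⟨row, hr, hs⟩ := h2
      exact ⟨row, hr, (rank_two_iff _).mp hs⟩)]
  · have hA2 : ¬ ∃ row ∈ rows, lowStatus row ∈ (["failed", "rejected", "returned"] : List String) := by
      intro ⟨row, hr, hm⟩
      exact h2 ⟨row, hr, (rank_two_iff _).mpr hm⟩
    rw [if_neg hA2, if_neg h2]
    have e1 : (∃ row ∈ rows, lowStatus row ∈ (["pending", "active", "in_progress", "generating"] : List String)) ↔
        ∃ row ∈ rows, (1 : Int) ≤ rankB (lowStatus row) := by
      constructor
      · rintro ⟨row, hr, hm⟩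
        exact ⟨row, hr, (rank_one_iff _).mpr (Or.inr hm)⟩
      · rintro ⟨row, hr, h1⟩
        rcases (rank_one_iff _).mp h1 with hf | hm
        · exact absurd ⟨row, hr, hf⟩ hA2
        · exact ⟨row, hr, hm⟩
    rw [if_congr e1 rfl rfl]

theorem foldl_max_le (rows : List (List (String × String))) (t : Int) (ht : t ≤ 2) :
    rows.foldl (fun a row => max a (rankB (lowStatus row))) t ≤ 2 := by
  induction rows generalizing t with
  | nil => simpa using ht
  | cons r rs ih =>
      simp only [List.foldl_cons]
      exact ih _ (by have := rankB_le (lowStatus r); omega)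

theorem le_foldl_max (rows : List (List (String × String))) (t c : Int) :
    c ≤ rows.foldl (fun a row => max a (rankB (lowStatus row))) t ↔
      c ≤ t ∨ ∃ row ∈ rows, c ≤ rankB (lowStatus row) := by
  induction rows generalizing t with
  | nil => simp
  | cons r rs ih =>
      simp only [List.foldl_cons, ih, le_max_iff, List.mem_cons, exists_eq_or_imp]
      rw [or_assoc]

theorem stepB_some (t : Int) (row : List (String × String)) :
    stepB (some t) row = some (max t (rankB (lowStatus row))) := by
  unfold stepB
  show (if rankB (lowStatus row) > t then some (rankB (lowStatus row)) else some t)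
      = some (max t (rankB (lowStatus row)))
  split_ifs with h <;> congr 1 <;> omega

theorem foldl_aux_some (rows : List (List (String × String))) (t : Int) :
    rows.foldl stepB (some t) = some (rows.foldl (fun a row => max a (rankB (lowStatus row))) t) := by
  induction rows generalizing t with
  | nil => rfl
  | cons r rs ih =>
      rw [List.foldl_cons, stepB_some, ih, List.foldl_cons]

theorem B_eq_cascade (rows : List (List (String × String))) :
    derive_run_status_py_alt rows = cascade rows := by
  unfold derive_run_status_py_alt cascade
  cases rows with
  | nil => simp
  | cons r rs =>
      have hfold : (r :: rs).foldl stepB none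
          = some (rs.foldl (fun a row => max a (rankB (lowStatus row))) (rankB (lowStatus r))) := by
        rw [List.foldl_cons]
        exact foldl_aux_some rs (rankB (lowStatus r))
      rw [hfold]
      set m := rs.foldl (fun a row => max a (rankB (lowStatus row))) (rankB (lowStatus r)) with hm
      have hle : m ≤ 2 := foldl_max_le _ _ (rankB_le _)
      have h2 : (2 : Int) ≤ m ↔ ∃ row ∈ r :: rs, (2 : Int) ≤ rankB (lowStatus row) := by
        rw [hm, le_foldl_max]
        simp only [List.mem_cons, exists_eq_or_imp]
      have h1 : (1 : Int) ≤ m ↔ ∃ row ∈ r :: rs, (1 : Int) ≤ rankB (lowStatus row) := by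
        rw [hm, le_foldl_max]
        simp only [List.mem_cons, exists_eq_or_imp]
      show (if m = 2 then "failed" else if m = 1 then "running" else "succeeded")
          = if ∃ row ∈ r :: rs, (2 : Int) ≤ rankB (lowStatus row) then "failed"
            else if ∃ row ∈ r :: rs, (1 : Int) ≤ rankB (lowStatus row) then "running"
            else if r :: rs ≠ [] then "succeeded" else "pending"
      by_cases e2 : ∃ row ∈ r :: rs, (2 : Int) ≤ rankB (lowStatus row)
      · have h : m = 2 := by have := h2.mpr e2; omega
        rw [if_pos h, if_pos e2]
      · have hm2 : ¬ m = 2 := by intro h; exact e2 (h2.mp (by omega))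
        by_cases e1 : ∃ row ∈ r :: rs, (1 : Int) ≤ rankB (lowStatus row)
        · have h : m = 1 := by have := h1.mpr e1; omega
          rw [if_neg hm2, if_pos h, if_neg e2, if_pos e1]
        · have hm1 : ¬ m = 1 := by intro h; exact e1 (h1.mp (by omega))
          rw [if_neg hm2, if_neg hm1, if_neg e2, if_neg e1,
            if_pos (show r :: rs ≠ [] by simp)]

-- ===== VERDICT =====
theorem derive_run_status_py_spec : Claim_equal_derive_run_status_py := by
  intro rows _
  unfold Spec_derive_run_status_py
  rw [A_eq_cascade, B_eq_cascade]
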